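-- pv_equiv track=rewrite | github.com/GChaucer/support-triage-starter | src/agent.py | _charges_plausibly_indicate_duplicate
-- ===== SOURCE A (Python) =====
-- def _charges_plausibly_indicate_duplicate(
--
--     recent_charges: list[dict],
--     charge_id: str | None,
-- ) -> bool:
--     if len(recent_charges) < 2:
--         return False
--
--     charge_groups: dict[tuple[str | None, str | None], list[dict]] = {}
--     for charge in recent_charges:
--         key = (charge.get("amount"), charge.get("posted_at"))
--         charge_groups.setdefault(key, []).append(charge)
--
--     for grouped_charges in charge_groups.values():
--         if len(grouped_charges) < 2:
--             continue
--         if not charge_id: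
--             return True
--         if any(charge.get("charge_id") == charge_id for charge in grouped_charges):
--             return True
--
--     return False
-- ===== SOURCE B (Python) =====
-- def _charges_plausibly_indicate_duplicate(
--     recent_charges: list[dict],
--     charge_id: str | None,
-- ) -> bool:
--     for i, charge in enumerate(recent_charges):
--         if charge_id and charge.get("charge_id") != charge_id:
--             continue
--         key = (charge.get("amount"), charge.get("posted_at"))
--         for j, other in enumerate(recent_charges):
--             if j != i and (other.get("amount"), other.get("posted_at")) == key:
--                 return True
--     return False
-- ===== Notes on version B (the rewrite author's own statement) =====
-- stated objective: alternative
-- what changed: Removes the grouping dictionary entirely: B answers by direct pairwise comparison - scan charges, skip those not matching a truthy charge_id, and for each remaining charge scan the list again for a different-index charge with the same (amount, posted_at) key; correct because a group of size >= 2 containing an admissible charge exists iff some admissible charge has a same-key partner at another index.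
import Mathlib
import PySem

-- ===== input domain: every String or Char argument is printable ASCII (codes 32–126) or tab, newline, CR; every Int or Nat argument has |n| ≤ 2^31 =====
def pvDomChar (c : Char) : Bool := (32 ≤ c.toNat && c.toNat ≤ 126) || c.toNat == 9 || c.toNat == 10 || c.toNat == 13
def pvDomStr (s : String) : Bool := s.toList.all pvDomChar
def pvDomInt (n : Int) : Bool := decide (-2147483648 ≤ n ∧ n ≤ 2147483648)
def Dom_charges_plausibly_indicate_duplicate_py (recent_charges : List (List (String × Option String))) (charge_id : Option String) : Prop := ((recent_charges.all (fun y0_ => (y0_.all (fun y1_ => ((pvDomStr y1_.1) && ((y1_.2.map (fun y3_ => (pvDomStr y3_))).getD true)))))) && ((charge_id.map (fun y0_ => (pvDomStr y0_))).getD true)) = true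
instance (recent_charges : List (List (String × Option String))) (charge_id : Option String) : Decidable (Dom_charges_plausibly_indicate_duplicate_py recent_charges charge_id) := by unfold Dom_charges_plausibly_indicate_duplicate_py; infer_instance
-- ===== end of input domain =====

-- B drops A's grouping dictionary entirely and answers by direct pairwise comparison:
-- for each admissible charge, scan the list again for a same-key charge at another index
-- (objective: alternative algorithm, O(n^2) instead of dict grouping).

-- shared helpers: charge.get(k) (missing key = None) and Python truthiness of charge_id
def pvGet (c : List (String × Option String)) (k : String) : Option String :=
  PySem.Dict.getD (PySem.Dict.mk c) k none

def pvKey (c : List (String × Option String)) : Option String × Option String :=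
  (pvGet c "amount", pvGet c "posted_at")

def pvFalsy (charge_id : Option String) : Bool := charge_id.getD "" == ""

-- ===== PORT A =====
def charges_plausibly_indicate_duplicate_py (recent_charges : List (List (String × Option String))) (charge_id : Option String) : Bool :=
  if recent_charges.length < 2 then false
  else
    -- charge_groups built by setdefault(key, []).append(charge); then the loop over
    -- .values() returning True / continuing, else False
    (recent_charges.foldl (fun d c => d.modify (pvKey c) [] (· ++ [c])) PySem.Dict.empty).values.any (fun grouped_charges =>
      if grouped_charges.length < 2 then false
      else if pvFalsy charge_id then true
      else grouped_charges.any (fun c => pvGet c "charge_id" == charge_id))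

-- ===== PORT B =====
def charges_plausibly_indicate_duplicate_py_alt (recent_charges : List (List (String × Option String))) (charge_id : Option String) : Bool :=
  -- for i, charge in enumerate(...): skip if charge_id truthy and id differs; then
  -- for j, other in enumerate(...): return True if j != i and other's key equals charge's key
  (PySem.List.enumerate recent_charges).any (fun ic =>
    (pvFalsy charge_id || (pvGet ic.2 "charge_id" == charge_id)) &&
    (PySem.List.enumerate recent_charges).any (fun jo =>
      (jo.1 != ic.1) && (pvKey jo.2 == pvKey ic.2)))

-- ===== PRECONDITION & SPEC =====
def Spec_charges_plausibly_indicate_duplicate_py (recent_charges : List (List (String × Option String))) (charge_id : Option String) (out : Bool) : Prop := out = charges_plausibly_indicate_duplicate_py_alt recent_charges charge_id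
instance (recent_charges : List (List (String × Option String))) (charge_id : Option String) (out : Bool) : Decidable (Spec_charges_plausibly_indicate_duplicate_py recent_charges charge_id out) := by unfold Spec_charges_plausibly_indicate_duplicate_py; infer_instance

-- ===== CLAIM (what is proved, stated in full; the proofs are below) =====
def Claim_equal_charges_plausibly_indicate_duplicate_py : Prop := ∀ (recent_charges : List (List (String × Option String))) (charge_id : Option String), Dom_charges_plausibly_indicate_duplicate_py recent_charges charge_id → Spec_charges_plausibly_indicate_duplicate_py recent_charges charge_id (charges_plausibly_indicate_duplicate_py recent_charges charge_id)

-- ===== LEMMAS AND PROOFS =====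

-- A's group for key k is the sublist of charges with that key
lemma groups_getD (rc : List (List (String × Option String))) (k : Option String × Option String) :
    (rc.foldl (fun d c => d.modify (pvKey c) [] (· ++ [c])) PySem.Dict.empty).getD k []
      = rc.filter (fun c => pvKey c == k) := by
  have h := PySem.Dict.getD_foldl_modify_append
      (l := rc.map (fun c => (pvKey c, c))) (d := PySem.Dict.empty) (c := k)
  rw [List.foldl_map] at h
  simpa [List.filter_map, Function.comp_def, List.map_map, PySem.Dict.getD_empty] using h

lemma groups_keys (rc : List (List (String × Option String))) :
    (rc.foldl (fun d c => d.modify (pvKey c) [] (· ++ [c])) PySem.Dict.empty).keys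
      = PySem.Set.ofList (rc.map pvKey) := by
  have h := PySem.Dict.keys_foldl_modify_key (l := rc) (key := pvKey) (d0 := ([] : List (List (String × Option String)))) (f := fun (_ : PySem.Dict (Option String × Option String) (List (List (String × Option String)))) (c : List (String × Option String)) => (· ++ [c])) (d := PySem.Dict.empty)
  rw [h]
  simp [PySem.Dict.keys_empty, PySem.Set.update, PySem.Set.ofList_eq_foldl]

-- with an index i carrying P, "some other index also carries P" is "at least two carry P"
lemma two_le_countP_iff {α : Type} (xs : List α) (P : α → Bool) (i : Nat) (hi : i < xs.length)
    (hPi : P xs[i] = true) :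
    2 ≤ xs.countP P ↔ ∃ j, ∃ hj : j < xs.length, j ≠ i ∧ P xs[j] = true := by
  induction xs generalizing i with
  | nil => exact absurd hi (by simp)
  | cons x xs ih =>
    cases i with
    | zero =>
      simp only [List.getElem_cons_zero] at hPi
      rw [List.countP_cons, hPi]
      rw [if_pos rfl]
      constructor
      · intro h
        have h1 : 1 ≤ xs.countP P := by omega
        rw [Nat.one_le_iff_ne_zero, ← Nat.pos_iff_ne_zero, List.countP_pos_iff] at h1
        obtain ⟨a, ha, hPa⟩ := h1
        obtain ⟨k, hk, rfl⟩ := List.mem_iff_getElem.mp ha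
        exact ⟨k + 1, by simpa using hk, by omega, by simpa using hPa⟩
      · rintro ⟨j, hj, hji, hPj⟩
        cases j with
        | zero => omega
        | succ k =>
          have hk : k < xs.length := by simpa using hj
          have : 0 < xs.countP P :=
            List.countP_pos_iff.mpr ⟨xs[k], List.getElem_mem hk, by simpa using hPj⟩
          omega
    | succ i' =>
      have hi' : i' < xs.length := by simpa using hi
      have hPi' : P xs[i'] = true := by simpa using hPi
      have hpos : 0 < xs.countP P :=
        List.countP_pos_iff.mpr ⟨xs[i'], List.getElem_mem hi', hPi'⟩
      rw [List.countP_cons]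
      constructor
      · intro h
        by_cases hx : P x = true
        · exact ⟨0, by simp, by omega, by simpa using hx⟩
        · have h2 : 2 ≤ xs.countP P := by
            rw [Bool.not_eq_true] at hx; rw [hx] at h; simpa using h
          obtain ⟨j, hj, hji, hPj⟩ := (ih i' hi' hPi').mp h2
          exact ⟨j + 1, by simpa using hj, by omega, by simpa using hPj⟩
      · rintro ⟨j, hj, hji, hPj⟩
        cases j with
        | zero =>
          simp only [List.getElem_cons_zero] at hPj
          rw [hPj]; rw [if_pos rfl]; omega
        | succ k =>
          have hk : k < xs.length := by simpa using hj
          have h2 : 2 ≤ xs.countP P :=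
            (ih i' hi' hPi').mpr ⟨k, hk, by omega, by simpa using hPj⟩
          split <;> omega

-- key equality transports the group filter
lemma filter_key_congr (rc : List (List (String × Option String)))
    (c c' : List (String × Option String)) (h : pvKey c = pvKey c') :
    rc.filter (fun x => pvKey x == pvKey c) = rc.filter (fun x => pvKey x == pvKey c') := by
  rw [h]

-- A returns true iff some admissible charge sits in a key-group of size ≥ 2
lemma A_iff (rc : List (List (String × Option String))) (cid : Option String) :
    charges_plausibly_indicate_duplicate_py rc cid = true ↔
      ∃ c ∈ rc, (pvFalsy cid || (pvGet c "charge_id" == cid)) = true ∧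
        2 ≤ (rc.filter (fun x => pvKey x == pvKey c)).length := by
  unfold charges_plausibly_indicate_duplicate_py
  have hcount : ∀ c, (rc.filter (fun x => pvKey x == pvKey c)).length ≤ rc.length :=
    fun c => List.length_filter_le _ _
  by_cases hlen : rc.length < 2
  · rw [if_pos hlen]
    simp only [Bool.false_eq_true, false_iff]
    rintro ⟨c, hc, _, h2⟩
    have := hcount c; omega
  · rw [if_neg hlen]
    have hnd : (rc.foldl (fun d c => d.modify (pvKey c) [] (· ++ [c])) PySem.Dict.empty).keys.Nodup := by
      rw [groups_keys]; exact PySem.Set.nodup_ofList _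
    have hGv : (rc.foldl (fun d c => d.modify (pvKey c) [] (· ++ [c])) PySem.Dict.empty).values
        = (PySem.Set.ofList (rc.map pvKey)).map (fun k => rc.filter (fun c => pvKey c == k)) := by
      rw [PySem.Dict.values_eq_map_keys _ hnd ([] : List (List (String × Option String))), groups_keys]
      simp only [groups_getD]
    rw [hGv, List.any_map]
    simp only [List.any_eq_true, PySem.Set.mem_ofList, Function.comp_def, List.mem_map]
    constructor
    · rintro ⟨k, ⟨c, hc, rfl⟩, hP⟩
      by_cases h2 : (rc.filter (fun x => pvKey x == pvKey c)).length < 2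
      · rw [if_pos h2] at hP; exact absurd hP (by simp)
      · rw [if_neg h2] at hP
        by_cases hf : pvFalsy cid = true
        · exact ⟨c, hc, by simp [hf], by omega⟩
        · rw [Bool.not_eq_true] at hf
          rw [if_neg (by simp [hf])] at hP
          simp only [List.any_eq_true, List.mem_filter, beq_iff_eq] at hP
          obtain ⟨c', ⟨hc', hkey⟩, hid⟩ := hP
          refine ⟨c', hc', by simp [hid], ?_⟩
          rw [← filter_key_congr rc c c' hkey.symm]; omega
    · rintro ⟨c, hc, hcond, h2⟩
      refine ⟨pvKey c, ⟨c, hc, rfl⟩, ?_⟩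
      rw [if_neg (by omega)]
      by_cases hf : pvFalsy cid = true
      · simp [hf]
      · rw [Bool.not_eq_true] at hf
        rw [if_neg (by simp [hf])]
        simp only [hf, Bool.false_or] at hcond
        simp only [List.any_eq_true, List.mem_filter, beq_iff_eq]
        exact ⟨c, ⟨hc, rfl⟩, by simpa using hcond⟩

-- B returns true iff the same condition holds
lemma B_iff (rc : List (List (String × Option String))) (cid : Option String) :
    charges_plausibly_indicate_duplicate_py_alt rc cid = true ↔
      ∃ c ∈ rc, (pvFalsy cid || (pvGet c "charge_id" == cid)) = true ∧
        2 ≤ (rc.filter (fun x => pvKey x == pvKey c)).length := by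
  unfold charges_plausibly_indicate_duplicate_py_alt
  simp only [List.any_eq_true, PySem.List.mem_enumerate_iff, Bool.and_eq_true]
  constructor
  · rintro ⟨p, ⟨i, hi, rfl⟩, hcond, q, ⟨j, hj, rfl⟩, hne, hkey⟩
    refine ⟨rc[i], List.getElem_mem hi, hcond, ?_⟩
    rw [← List.countP_eq_length_filter]
    refine (two_le_countP_iff rc (fun x => pvKey x == pvKey rc[i]) i hi (by simp)).mpr
      ⟨j, hj, ?_, hkey⟩
    intro h; subst h
    simp at hne
  · rintro ⟨c, hc, hcond, h2⟩
    obtain ⟨i, hi, rfl⟩ := List.mem_iff_getElem.mp hc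
    rw [← List.countP_eq_length_filter] at h2
    obtain ⟨j, hj, hne, hkey⟩ :=
      (two_le_countP_iff rc (fun x => pvKey x == pvKey rc[i]) i hi (by simp)).mp h2
    exact ⟨(0 + (i : Int), rc[i]), ⟨i, hi, rfl⟩, hcond,
      ⟨(0 + (j : Int), rc[j]), ⟨j, hj, rfl⟩, by simpa using hne, hkey⟩⟩

-- ===== VERDICT (by name: the statement is the Claim_ definition above) =====
theorem charges_plausibly_indicate_duplicate_py_spec : Claim_equal_charges_plausibly_indicate_duplicate_py := by
  intro rc cid _
  unfold Spec_charges_plausibly_indicate_duplicate_py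
  rw [Bool.eq_iff_iff, A_iff, B_iff]
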